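-- pv_equiv track=rewrite | github.com/nembrinj/protofablab | 2023/projects/02_ProtoFabStats/rapsberrypi_app/utils/user_events_detection.py | ComputeNumberOfUsers
-- ===== SOURCE A (Python) =====
-- def ComputeNumberOfUsers(events):
--   number_of_users = []
--   current_number_of_users = 0
--
--   for event in events:
--     if event["event"] == 1:
--       current_number_of_users += 1
--     elif event["event"] == -1:
--       current_number_of_users -= 1
--       current_number_of_users = max(current_number_of_users, 0)
--     number_of_users.append({
--       'number': current_number_of_users,
--       'time': event['start']
--     })
--
--   return number_of_users
-- ===== SOURCE B (Python) =====
-- def ComputeNumberOfUsers(events):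
--   # staged passes: deltas -> prefix sums -> running minima -> zip into output
--   deltas = [1 if e["event"] == 1 else (-1 if e["event"] == -1 else 0) for e in events]
--   prefixes = []
--   t = 0
--   for d in deltas:
--     t += d
--     prefixes.append(t)
--   mins = []
--   m = 0
--   for p in prefixes:
--     m = min(m, p)
--     mins.append(m)
--   return [{'number': p - m, 'time': e['start']}
--           for e, p, m in zip(events, prefixes, mins)]
-- ===== Notes on version B (the rewrite author's own statement) =====
-- stated objective: alternative
-- what changed: Replaces A's single clamped-counter loop by staged passes: a delta list, its prefix sums, a running-minimum list, and a final zip using the identity clamped count = prefix - min prefix seen; no max-clamping of a counter.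
import Mathlib
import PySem

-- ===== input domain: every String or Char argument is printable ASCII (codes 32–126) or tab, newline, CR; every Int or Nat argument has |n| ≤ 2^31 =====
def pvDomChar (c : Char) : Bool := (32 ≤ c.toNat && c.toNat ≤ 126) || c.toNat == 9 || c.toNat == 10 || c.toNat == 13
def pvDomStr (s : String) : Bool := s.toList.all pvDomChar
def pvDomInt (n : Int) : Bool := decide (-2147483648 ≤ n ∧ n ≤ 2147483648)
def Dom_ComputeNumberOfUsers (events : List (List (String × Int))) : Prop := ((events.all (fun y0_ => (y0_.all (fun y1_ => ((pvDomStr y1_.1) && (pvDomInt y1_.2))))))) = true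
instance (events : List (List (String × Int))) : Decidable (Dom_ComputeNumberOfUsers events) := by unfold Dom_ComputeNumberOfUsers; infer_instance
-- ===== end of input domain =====

-- B replaces A's single clamped-counter loop by staged passes (delta list, prefix sums,
-- running minima, zip), using the identity clamped count = prefix - min prefix seen.
-- Pre_ excludes events whose dicts lack the key "event" or "start", where Python A raises KeyError.


-- ===== PORT A =====
-- dict[k] as first-match association-list lookup (insertion-order dict convention);
-- total via getD 0, which is only reached outside Pre_ (where Python raises KeyError)
def pvLookup (e : List (String × Int)) (k : String) : Int :=
  (List.lookup k e).getD 0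

def pvGoA : List (List (String × Int)) → Int → List (List (String × Int))
  | [], _ => []
  | e :: rest, c =>
    let c' := if pvLookup e "event" = 1 then c + 1
              else if pvLookup e "event" = -1 then max (c - 1) 0
              else c
    [("number", c'), ("time", pvLookup e "start")] :: pvGoA rest c'

def ComputeNumberOfUsers (events : List (List (String × Int))) : List (List (String × Int)) :=
  pvGoA events 0

-- ===== PORT B =====
-- pass 1: the per-event delta
def pvDelta (e : List (String × Int)) : Int :=
  if pvLookup e "event" = 1 then 1 else if pvLookup e "event" = -1 then -1 else 0

-- a left scan with accumulator (prefix sums / running minima)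
def pvScan (f : Int → Int → Int) (acc : Int) : List Int → List Int
  | [] => []
  | x :: xs => let a := f acc x; a :: pvScan f a xs

-- final zip of events, prefixes and minima into the output rows
def pvZipOut : List (List (String × Int)) → List Int → List Int → List (List (String × Int))
  | e :: es, p :: ps, m :: ms =>
      [("number", p - m), ("time", pvLookup e "start")] :: pvZipOut es ps ms
  | _, _, _ => []

def ComputeNumberOfUsers_alt (events : List (List (String × Int))) : List (List (String × Int)) :=
  let deltas := events.map pvDelta
  let prefixes := pvScan (· + ·) 0 deltas
  let mins := pvScan min 0 prefixes
  pvZipOut events prefixes mins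

-- ===== PRECONDITION & SPEC =====
-- Pre_: every event dict carries the keys "event" and "start"; otherwise Python A raises KeyError.
def Pre_ComputeNumberOfUsers (events : List (List (String × Int))) : Prop :=
  ∀ e ∈ events, (List.lookup "event" e).isSome ∧ (List.lookup "start" e).isSome
instance (events : List (List (String × Int))) : Decidable (Pre_ComputeNumberOfUsers events) := by
  unfold Pre_ComputeNumberOfUsers; infer_instance

def pvWitness_ComputeNumberOfUsers : (List (List (String × Int))) :=
  [[("event", 1), ("start", 10)], [("event", -1), ("start", 20)]]

def Spec_ComputeNumberOfUsers (events : List (List (String × Int))) (out : List (List (String × Int))) : Prop := out = ComputeNumberOfUsers_alt events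
instance (events : List (List (String × Int))) (out : List (List (String × Int))) : Decidable (Spec_ComputeNumberOfUsers events out) := by unfold Spec_ComputeNumberOfUsers; infer_instance

-- ===== CLAIM (what is proved, stated in full; the proofs are below) =====
def Claim_equal_ComputeNumberOfUsers : Prop := ∀ (events : List (List (String × Int))), Dom_ComputeNumberOfUsers events → Pre_ComputeNumberOfUsers events → Spec_ComputeNumberOfUsers events (ComputeNumberOfUsers events)

-- ===== LEMMAS AND PROOFS =====
-- Invariant: A's count at state p, m (with m ≤ p, m ≤ 0) is p - m; the scans carry p and m.
theorem pvGoA_eq_staged (events : List (List (String × Int))) :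
    ∀ (p m : Int), m ≤ p → m ≤ 0 →
      pvGoA events (p - m) =
        pvZipOut events (pvScan (· + ·) p (events.map pvDelta))
          (pvScan min m (pvScan (· + ·) p (events.map pvDelta))) := by
  induction events with
  | nil => intro p m _ _; rfl
  | cons e rest ih =>
    intro p m hmp hm0
    simp only [pvGoA, List.map, pvScan, pvZipOut, pvDelta]
    by_cases h1 : pvLookup e "event" = 1
    · have hmin : min m (p + 1) = m := by omega
      simp only [h1, reduceIte, hmin]
      rw [show p - m + 1 = p + 1 - m by omega, ih (p + 1) m (by omega) hm0]
    · by_cases h2 : pvLookup e "event" = -1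
      · simp only [h2, reduceIte, Int.reduceEq]
        by_cases hlt : p - 1 < m
        · have hmin : min m (p + -1) = p - 1 := by omega
          simp only [hmin]
          rw [show max (p - m - 1) 0 = p + -1 - (p - 1) by omega,
              ih (p + -1) (p - 1) (by omega) (by omega)]
        · have hmin : min m (p + -1) = m := by omega
          simp only [hmin]
          rw [show max (p - m - 1) 0 = p + -1 - m by omega,
              ih (p + -1) m (by omega) hm0]
      · have hmin : min m (p + 0) = m := by omega
        simp only [if_neg h1, if_neg h2, hmin]
        rw [show p - m = p + 0 - m by omega, ih (p + 0) m (by omega) hm0]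

-- ===== VERDICT (by name: the statement is the Claim_ definition above) =====
theorem ComputeNumberOfUsers_spec : Claim_equal_ComputeNumberOfUsers := by
  intro events _ _
  unfold Spec_ComputeNumberOfUsers ComputeNumberOfUsers ComputeNumberOfUsers_alt
  have h := pvGoA_eq_staged events 0 0 le_rfl le_rfl
  simpa using h
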